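-- pv_equiv track=rewrite | github.com/dywzju09-blip/cpg_generator_export | tools/supplychain/run_top15_benchmark.py | _feature_enabled_dependency_keys
-- ===== SOURCE A (Python) =====
-- from typing import Any
--
-- def _feature_enabled_dependency_keys(manifest_data: dict[str, Any], enabled_features: list[str]) -> set[str]:
--     features_table = manifest_data.get("features") or {}
--     if not isinstance(features_table, dict):
--         features_table = {}
--     enabled = {str(feature).strip() for feature in enabled_features if str(feature).strip()}
--     if "default" in features_table and "default" not in enabled:
--         enabled.add("default")
--
--     out: set[str] = set()
--     queue = list(enabled)
--     seen = set()
--     while queue: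
--         feature = queue.pop()
--         if feature in seen:
--             continue
--         seen.add(feature)
--         for token in features_table.get(feature) or []:
--             text = str(token or "").strip()
--             if not text:
--                 continue
--             if text.startswith("dep:"):
--                 out.add(text.split(":", 1)[1])
--                 continue
--             dep_key = text.split("/", 1)[0].strip()
--             if dep_key in features_table:
--                 queue.append(dep_key)
--             else:
--                 out.add(dep_key)
--     return out
-- ===== SOURCE B (Python) =====
-- # B: recursive depth-first traversal (visit helper) instead of an explicit work-stack loop.
-- # Children and roots are visited in reverse order to preserve the original LIFO visit order
-- # (irrelevant to the returned set, kept for determinism).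
-- def _feature_enabled_dependency_keys(manifest_data, enabled_features):
--     features_table = manifest_data.get("features") or {}
--     if not isinstance(features_table, dict):
--         features_table = {}
--     enabled = {str(feature).strip() for feature in enabled_features if str(feature).strip()}
--     if "default" in features_table and "default" not in enabled:
--         enabled.add("default")
--
--     out = set()
--     seen = set()
--
--     def visit(feature):
--         if feature in seen:
--             return
--         seen.add(feature)
--         children = []
--         for token in features_table.get(feature) or []:
--             text = str(token or "").strip()
--             if not text:
--                 continue
--             if text.startswith("dep:"):
--                 out.add(text.split(":", 1)[1])
--                 continue
--             dep_key = text.split("/", 1)[0].strip()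
--             if dep_key in features_table:
--                 children.append(dep_key)
--             else:
--                 out.add(dep_key)
--         for child in reversed(children):
--             visit(child)
--
--     for feature in reversed(list(enabled)):
--         visit(feature)
--     return out
-- ===== Notes on version B (the rewrite author's own statement) =====
-- stated objective: alternative
-- what changed: The explicit while-loop with a mutable work queue (pop/push) is replaced by a recursive depth-first visit helper that recurses into feature children directly, keeping the token-parsing logic identical.
import Mathlib
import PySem

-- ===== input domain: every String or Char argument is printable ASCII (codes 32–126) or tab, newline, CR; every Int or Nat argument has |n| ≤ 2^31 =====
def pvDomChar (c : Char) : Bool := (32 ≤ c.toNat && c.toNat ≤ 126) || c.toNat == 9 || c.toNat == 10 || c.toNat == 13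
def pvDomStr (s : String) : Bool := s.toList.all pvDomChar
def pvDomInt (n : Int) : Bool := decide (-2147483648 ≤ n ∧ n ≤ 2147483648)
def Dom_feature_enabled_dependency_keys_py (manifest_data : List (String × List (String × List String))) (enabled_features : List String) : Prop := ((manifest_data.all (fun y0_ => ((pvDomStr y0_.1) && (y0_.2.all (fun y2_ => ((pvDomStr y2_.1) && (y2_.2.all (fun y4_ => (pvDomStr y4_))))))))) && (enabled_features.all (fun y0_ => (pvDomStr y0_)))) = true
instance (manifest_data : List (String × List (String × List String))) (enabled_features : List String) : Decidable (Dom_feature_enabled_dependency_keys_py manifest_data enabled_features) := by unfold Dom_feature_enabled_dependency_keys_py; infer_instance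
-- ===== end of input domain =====

-- B replaces A's explicit work-stack loop by a recursive depth-first visit helper (identical
-- token parsing); the proof shows the two ports return the identical list.

-- ===== PORT A =====

/-- Body of A's `for token in features_table.get(feature) or []` loop; state = (out, queue).
`str(token or "").strip()` is `token.strip()` on strings ("" stays ""); the indexings `[1]`/`[0]`
after the splits are always in range (text starts with "dep:" / a split result is nonempty),
so the total `pyGetD` is exact here. -/
def pvTokA (ft : PySem.Dict String (List String)) (st : PySem.Set String × List String) (token : String) : PySem.Set String × List String :=
  let text := PySem.Str.strip token
  if text = "" then st
  else if PySem.Str.startswith text "dep:" then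
    (PySem.Set.add st.1 (PySem.List.pyGetD ((PySem.Str.splitMax? text ":" 1).getD []) 1 ""), st.2)
  else
    let dep_key := PySem.Str.strip (PySem.List.pyGetD ((PySem.Str.splitMax? text "/" 1).getD []) 0 "")
    if ft.contains dep_key then (st.1, st.2 ++ [dep_key])
    else (PySem.Set.add st.1 dep_key, st.2)

/-- Number of feature keys not yet in `seen` — the termination measure of A's while loop. -/
def pvUnseen (ft : PySem.Dict String (List String)) (seen : PySem.Set String) : Nat :=
  ft.keys.countP (fun k => !(PySem.Set.contains seen k))

lemma pvSet_contains_add (s : PySem.Set String) (x y : String) :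
    PySem.Set.contains (PySem.Set.add s x) y = (PySem.Set.contains s y || y == x) := by
  simp only [PySem.Set.add, PySem.Set.contains]
  by_cases hx : List.contains s x = true
  · simp only [hx, if_true]
    by_cases hxy : y = x
    · subst hxy; simp_all
    · simp [hxy]
  · simp only [hx]
    by_cases hxy : y = x
    · subst hxy; simp
    · simp [hxy]

lemma pvUnseen_add_lt (ft : PySem.Dict String (List String)) (seen : PySem.Set String) (f : String)
    (hkey : ft.contains f = true) (hseen : PySem.Set.contains seen f = false) :
    pvUnseen ft (PySem.Set.add seen f) < pvUnseen ft seen := by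
  unfold pvUnseen
  have hf : f ∈ ft.keys := (PySem.Dict.contains_iff_mem_keys ft f).mp hkey
  obtain ⟨l1, l2, hsplit⟩ := List.append_of_mem hf
  rw [hsplit]
  simp only [List.countP_append, List.countP_cons]
  have h1 : List.countP (fun k => !(PySem.Set.contains (PySem.Set.add seen f) k)) l1 ≤
      List.countP (fun k => !(PySem.Set.contains seen k)) l1 := by
    apply List.countP_mono_left; intro k _ hk
    simp only [pvSet_contains_add, Bool.not_eq_true', Bool.or_eq_false_iff] at hk
    simp only [Bool.not_eq_true']
    exact hk.1
  have h2 : List.countP (fun k => !(PySem.Set.contains (PySem.Set.add seen f) k)) l2 ≤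
      List.countP (fun k => !(PySem.Set.contains seen k)) l2 := by
    apply List.countP_mono_left; intro k _ hk
    simp only [pvSet_contains_add, Bool.not_eq_true', Bool.or_eq_false_iff] at hk
    simp only [Bool.not_eq_true']
    exact hk.1
  have hat : (!(PySem.Set.contains (PySem.Set.add seen f) f)) = false := by
    rw [pvSet_contains_add]
    simp
  have hat' : (!(PySem.Set.contains seen f)) = true := by rw [hseen]; rfl
  simp only [hat, hat']
  simp only [Bool.false_eq_true, if_false, if_true]
  omega

lemma pvUnseen_add_eq (ft : PySem.Dict String (List String)) (seen : PySem.Set String) (f : String)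
    (hkey : ft.contains f = false) :
    pvUnseen ft (PySem.Set.add seen f) = pvUnseen ft seen := by
  unfold pvUnseen
  apply List.countP_congr
  intro k hk
  have : k ≠ f := by
    intro h; subst h
    exact absurd ((PySem.Dict.contains_iff_mem_keys ft k).mpr hk) (by simp [hkey])
  simp [this]

/-- A's `while queue:` loop; state = (seen, out, queue), `queue.pop()` pops the last element. -/
def pvLoopA (ft : PySem.Dict String (List String)) (seen out : PySem.Set String) (queue : List String) : PySem.Set String × PySem.Set String :=
  match hpop : PySem.List.pop? queue with
  | none => (seen, out)
  | some fr =>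
    if hseen : PySem.Set.contains seen fr.1 = true then
      pvLoopA ft seen out fr.2
    else
      let seen' := PySem.Set.add seen fr.1
      let st := ((ft.get? fr.1).getD []).foldl (pvTokA ft) (out, fr.2)
      pvLoopA ft seen' st.1 st.2
termination_by (pvUnseen ft seen, queue.length)
decreasing_by
  · have := PySem.List.length_of_pop?_eq_some queue hpop
    exact Prod.Lex.right _ (by omega)
  · by_cases hkey : ft.contains fr.1 = true
    · exact Prod.Lex.left _ _ (pvUnseen_add_lt ft seen fr.1 hkey (by simpa using hseen))
    · have hnone : ft.get? fr.1 = none :=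
        (PySem.Dict.get?_eq_none_iff_contains ft fr.1).mpr (by simpa using hkey)
      have hlen := PySem.List.length_of_pop?_eq_some queue hpop
      rw [pvUnseen_add_eq ft seen fr.1 (by simpa using hkey)]
      simp only [hnone, Option.getD_none, List.foldl_nil]
      exact Prod.Lex.right _ (by omega)

def feature_enabled_dependency_keys_py (manifest_data : List (String × List (String × List String))) (enabled_features : List String) : List String :=
  -- features_table = manifest_data.get("features") or {}  (the isinstance check is a no-op under the type convention; `or {}` = default {})
  let features_table : PySem.Dict String (List String) :=
    PySem.Dict.mk (((PySem.Dict.mk manifest_data).get? "features").getD [])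
  -- enabled = {str(feature).strip() for feature in enabled_features if str(feature).strip()}
  let enabled := enabled_features.foldl (fun s feature =>
      let t := PySem.Str.strip feature
      if t = "" then s else PySem.Set.add s t) PySem.Set.empty
  -- if "default" in features_table and "default" not in enabled: enabled.add("default")
  let enabled := if features_table.contains "default" && !(PySem.Set.contains enabled "default")
      then PySem.Set.add enabled "default" else enabled
  -- out = set(); queue = list(enabled); seen = set(); while queue: …
  (pvLoopA features_table PySem.Set.empty PySem.Set.empty enabled).2

-- ===== PORT B =====

/-- Body of B's token loop inside `visit`; state = (out, children). Same parsing as A's. -/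
def pvTokB (ft : PySem.Dict String (List String)) (st : PySem.Set String × List String) (token : String) : PySem.Set String × List String :=
  let text := PySem.Str.strip token
  if text = "" then st
  else if PySem.Str.startswith text "dep:" then
    (PySem.Set.add st.1 (PySem.List.pyGetD ((PySem.Str.splitMax? text ":" 1).getD []) 1 ""), st.2)
  else
    let dep_key := PySem.Str.strip (PySem.List.pyGetD ((PySem.Str.splitMax? text "/" 1).getD []) 0 "")
    if ft.contains dep_key then (st.1, st.2 ++ [dep_key])
    else (PySem.Set.add st.1 dep_key, st.2)

/-- B's recursive `visit`; state = (seen, out). The fuel argument is only a totality guard: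
the recursion depth is bounded by the number of feature keys, so with the fuel the driver
passes the `0` branch is never reached (the equivalence proof below establishes this). -/
def pvVisitB (ft : PySem.Dict String (List String)) : Nat → String → PySem.Set String × PySem.Set String → PySem.Set String × PySem.Set String
  | 0, _, st => st
  | Nat.succ n, feature, st =>
    if PySem.Set.contains st.1 feature = true then st
    else
      let seen := PySem.Set.add st.1 feature
      let r := ((ft.get? feature).getD []).foldl (pvTokB ft) (st.2, [])
      r.2.reverse.foldl (fun st child => pvVisitB ft n child st) (seen, r.1)

def feature_enabled_dependency_keys_py_alt (manifest_data : List (String × List (String × List String))) (enabled_features : List String) : List String :=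
  let features_table : PySem.Dict String (List String) :=
    PySem.Dict.mk (((PySem.Dict.mk manifest_data).get? "features").getD [])
  let enabled := enabled_features.foldl (fun s feature =>
      let t := PySem.Str.strip feature
      if t = "" then s else PySem.Set.add s t) PySem.Set.empty
  let enabled := if features_table.contains "default" && !(PySem.Set.contains enabled "default")
      then PySem.Set.add enabled "default" else enabled
  -- for feature in reversed(list(enabled)): visit(feature)
  (enabled.reverse.foldl (fun st feature => pvVisitB features_table (features_table.keys.length + 1) feature st)
      (PySem.Set.empty, PySem.Set.empty)).2

-- ===== PRECONDITION & SPEC =====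
def Spec_feature_enabled_dependency_keys_py (manifest_data : List (String × List (String × List String))) (enabled_features : List String) (out : List String) : Prop := out = feature_enabled_dependency_keys_py_alt manifest_data enabled_features
instance (manifest_data : List (String × List (String × List String))) (enabled_features : List String) (out : List String) : Decidable (Spec_feature_enabled_dependency_keys_py manifest_data enabled_features out) := by unfold Spec_feature_enabled_dependency_keys_py; infer_instance

-- ===== CLAIM (what is proved, stated in full; the proofs are below) =====
def Claim_equal_feature_enabled_dependency_keys_py : Prop := ∀ (manifest_data : List (String × List (String × List String))) (enabled_features : List String), Dom_feature_enabled_dependency_keys_py manifest_data enabled_features → Spec_feature_enabled_dependency_keys_py manifest_data enabled_features (feature_enabled_dependency_keys_py manifest_data enabled_features)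

-- ===== LEMMAS AND PROOFS =====

lemma pvUnseen_add_le (ft : PySem.Dict String (List String)) (seen : PySem.Set String) (f : String) :
    pvUnseen ft (PySem.Set.add seen f) ≤ pvUnseen ft seen := by
  unfold pvUnseen
  apply List.countP_mono_left
  intro k _ hk
  simp only [pvSet_contains_add, Bool.not_eq_true', Bool.or_eq_false_iff] at hk
  simp only [Bool.not_eq_true']
  exact hk.1

lemma pvTokB_eq_pvTokA : pvTokB = pvTokA := rfl

lemma pvVisitB_succ (ft : PySem.Dict String (List String)) (n : Nat) (f : String)
    (st : PySem.Set String × PySem.Set String) :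
    pvVisitB ft (n + 1) f st =
      if PySem.Set.contains st.1 f = true then st
      else
        (((ft.get? f).getD []).foldl (pvTokB ft) (st.2, [])).2.reverse.foldl
          (fun st child => pvVisitB ft n child st)
          (PySem.Set.add st.1 f, (((ft.get? f).getD []).foldl (pvTokB ft) (st.2, [])).1) := rfl

lemma pvPop_none (q : List String) (h : PySem.List.pop? q = none) : q = [] := by
  induction q using List.reverseRecOn with
  | nil => rfl
  | append_singleton ys y _ => rw [PySem.List.pop?_last] at h; cases h

lemma pvPop_some (q : List String) (fr : String × List String)
    (h : PySem.List.pop? q = some fr) : q = fr.2 ++ [fr.1] := by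
  induction q using List.reverseRecOn with
  | nil => simp [show PySem.List.pop? ([] : List String) = none from rfl] at h
  | append_singleton ys y _ =>
    rw [PySem.List.pop?_last] at h
    cases h; rfl

lemma pvTokA_split (ft : PySem.Dict String (List String)) (o : PySem.Set String) (q : List String) (t : String) :
    pvTokA ft (o, q) t = ((pvTokA ft (o, []) t).1, q ++ (pvTokA ft (o, []) t).2) := by
  simp only [pvTokA]
  split_ifs <;> simp

lemma pvFold_split (ft : PySem.Dict String (List String)) :
    ∀ (toks : List String) (o : PySem.Set String) (q : List String),
    toks.foldl (pvTokA ft) (o, q) =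
      ((toks.foldl (pvTokA ft) (o, [])).1, q ++ (toks.foldl (pvTokA ft) (o, [])).2) := by
  intro toks
  induction toks with
  | nil => intro o q; simp
  | cons t toks ih =>
    intro o q
    simp only [List.foldl_cons]
    rw [pvTokA_split ft o q t]
    rw [ih (pvTokA ft (o, []) t).1 (q ++ (pvTokA ft (o, []) t).2),
        ih (pvTokA ft (o, []) t).1 (pvTokA ft (o, []) t).2]
    simp

lemma pvFoldl_pres {α β : Type} (P : β → Prop) (g : β → α → β)
    (h : ∀ st c, P st → P (g st c)) :
    ∀ (l : List α) (st : β), P st → P (l.foldl g st) := by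
  intro l
  induction l with
  | nil => intro st hst; exact hst
  | cons c l ih => intro st hst; exact ih _ (h _ _ hst)

lemma pvVisit_contains_mono (ft : PySem.Dict String (List String)) :
    ∀ (n : Nat) (f : String) (st : PySem.Set String × PySem.Set String) (y : String),
    PySem.Set.contains st.1 y = true → PySem.Set.contains (pvVisitB ft n f st).1 y = true := by
  intro n
  induction n with
  | zero => intro f st y hy; simpa [pvVisitB] using hy
  | succ n ih =>
    intro f st y hy
    simp only [pvVisitB]
    split_ifs with hc
    · exact hy
    · apply pvFoldl_pres (fun st => PySem.Set.contains st.1 y = true)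
        (fun st child => pvVisitB ft n child st) (fun st c h => ih c st y h)
      simp only [pvSet_contains_add, hy, Bool.true_or]

lemma pvVisit_u_le (ft : PySem.Dict String (List String)) (n : Nat) (f : String)
    (st : PySem.Set String × PySem.Set String) :
    pvUnseen ft (pvVisitB ft n f st).1 ≤ pvUnseen ft st.1 := by
  unfold pvUnseen
  apply List.countP_mono_left
  intro k _ hk
  cases hcs : PySem.Set.contains st.1 k
  · simp
  · rw [pvVisit_contains_mono ft n f st k hcs] at hk
    simp at hk

lemma pvFoldr_visit_u_le (ft : PySem.Dict String (List String)) (n : Nat) :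
    ∀ (cs : List String) (st : PySem.Set String × PySem.Set String),
    pvUnseen ft ((cs.foldr (fun f st => pvVisitB ft n f st) st)).1 ≤ pvUnseen ft st.1 := by
  intro cs
  induction cs with
  | nil => intro st; exact le_refl _
  | cons c cs ih =>
    intro st
    simp only [List.foldr_cons]
    exact le_trans (pvVisit_u_le ft n c _) (ih st)

lemma pvVisit_fi (ft : PySem.Dict String (List String)) :
    ∀ (m : Nat) (st : PySem.Set String × PySem.Set String) (f : String) (n1 n2 : Nat),
    pvUnseen ft st.1 ≤ m → pvUnseen ft st.1 < n1 → pvUnseen ft st.1 < n2 →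
    pvVisitB ft n1 f st = pvVisitB ft n2 f st := by
  intro m
  induction m with
  | zero =>
    intro st f n1 n2 hm h1 h2
    obtain ⟨a, rfl⟩ : ∃ a, n1 = a + 1 := ⟨n1 - 1, by omega⟩
    obtain ⟨b, rfl⟩ : ∃ b, n2 = b + 1 := ⟨n2 - 1, by omega⟩
    simp only [pvVisitB]
    split_ifs with hc
    · rfl
    · have hkey : ft.contains f = false := by
        by_contra hk
        have := pvUnseen_add_lt ft st.1 f (by simpa using hk) (by simpa using hc)
        omega
      have hnone : ft.get? f = none := (PySem.Dict.get?_eq_none_iff_contains ft f).mpr hkey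
      simp [hnone]
  | succ m ih =>
    intro st f n1 n2 hm h1 h2
    obtain ⟨a, rfl⟩ : ∃ a, n1 = a + 1 := ⟨n1 - 1, by omega⟩
    obtain ⟨b, rfl⟩ : ∃ b, n2 = b + 1 := ⟨n2 - 1, by omega⟩
    simp only [pvVisitB]
    split_ifs with hc
    · rfl
    · by_cases hkey : ft.contains f = true
      · have hlt := pvUnseen_add_lt ft st.1 f hkey (by simpa using hc)
        have hinner : ∀ (cs : List String) (st' : PySem.Set String × PySem.Set String),
            pvUnseen ft st'.1 ≤ pvUnseen ft (PySem.Set.add st.1 f) →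
            cs.foldl (fun st child => pvVisitB ft a child st) st' =
            cs.foldl (fun st child => pvVisitB ft b child st) st' := by
          intro cs
          induction cs with
          | nil => intro st' _; rfl
          | cons c cs ihc =>
            intro st' hst'
            simp only [List.foldl_cons]
            have hvc : pvVisitB ft a c st' = pvVisitB ft b c st' := by
              apply ih st' c a b <;> omega
            rw [hvc]
            exact ihc _ (le_trans (pvVisit_u_le ft b c st') hst')
        exact hinner _ _ (le_refl _)
      · have hnone : ft.get? f = none :=
          (PySem.Dict.get?_eq_none_iff_contains ft f).mpr (by simpa using hkey)
        simp [hnone]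

lemma pvFoldr_visit_fi (ft : PySem.Dict String (List String)) (a b : Nat) :
    ∀ (cs : List String) (st : PySem.Set String × PySem.Set String),
    pvUnseen ft st.1 < a → pvUnseen ft st.1 < b →
    cs.foldr (fun f st => pvVisitB ft a f st) st = cs.foldr (fun f st => pvVisitB ft b f st) st := by
  intro cs
  induction cs with
  | nil => intro st _ _; rfl
  | cons c cs ih =>
    intro st ha hb
    simp only [List.foldr_cons]
    rw [ih st ha hb]
    have hle := pvFoldr_visit_u_le ft b cs st
    exact pvVisit_fi ft (pvUnseen ft ((cs.foldr (fun f st => pvVisitB ft b f st) st)).1) _ c a b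
      (le_refl _) (by omega) (by omega)

lemma pvLoopA_eq_foldr (ft : PySem.Dict String (List String)) :
    ∀ (seen out : PySem.Set String) (queue : List String),
    ∀ (n : Nat), pvUnseen ft seen < n →
    pvLoopA ft seen out queue = queue.foldr (fun f st => pvVisitB ft n f st) (seen, out) := by
  intro seen out queue
  induction seen, out, queue using pvLoopA.induct ft with
  | case1 seen out queue hpop =>
    intro n hn
    rw [pvPop_none queue hpop]
    rw [pvLoopA]
    split
    · rfl
    · rename_i fr heq
      rw [show PySem.List.pop? ([] : List String) = none from rfl] at heq
      simp at heq
  | case2 seen out queue fr hpop hseen ih =>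
    intro n hn
    obtain ⟨k, rfl⟩ : ∃ k, n = k + 1 := ⟨n - 1, by omega⟩
    conv_rhs => rw [pvPop_some queue fr hpop]
    rw [List.foldr_append]
    simp only [List.foldr_cons, List.foldr_nil]
    rw [pvLoopA]
    split
    · rename_i heq; rw [hpop] at heq; simp at heq
    · rename_i fr' heq
      rw [hpop] at heq
      obtain rfl : fr = fr' := Option.some.inj heq
      rw [dif_pos hseen]
      rw [pvVisitB_succ]
      simp only []
      rw [if_pos hseen]
      exact ih (k + 1) hn
  | case3 seen out queue fr hpop hseen seen' st ih =>
    intro n hn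
    obtain ⟨k, rfl⟩ : ∃ k, n = k + 1 := ⟨n - 1, by omega⟩
    have ih' : ∀ n : Nat, pvUnseen ft (PySem.Set.add seen fr.1) < n →
        pvLoopA ft (PySem.Set.add seen fr.1)
          (((ft.get? fr.1).getD []).foldl (pvTokA ft) (out, fr.2)).1
          (((ft.get? fr.1).getD []).foldl (pvTokA ft) (out, fr.2)).2 =
        List.foldr (fun f st => pvVisitB ft n f st)
          (PySem.Set.add seen fr.1, (((ft.get? fr.1).getD []).foldl (pvTokA ft) (out, fr.2)).1)
          (((ft.get? fr.1).getD []).foldl (pvTokA ft) (out, fr.2)).2 := ih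
    conv_rhs => rw [pvPop_some queue fr hpop]
    rw [List.foldr_append]
    simp only [List.foldr_cons, List.foldr_nil]
    rw [pvLoopA]
    split
    · rename_i heq; rw [hpop] at heq; simp at heq
    · rename_i fr' heq
      rw [hpop] at heq
      obtain rfl : fr = fr' := Option.some.inj heq
      rw [dif_neg hseen]
      rw [ih' (k + 1) (by have := pvUnseen_add_le ft seen fr.1; omega)]
      rw [pvFold_split ft ((ft.get? fr.1).getD []) out fr.2]
      simp only []
      rw [List.foldr_append]
      congr 1
      -- remaining: children-fold at fuel k+1 equals B's recursion at fuel k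
      rw [pvVisitB_succ]
      simp only [pvTokB_eq_pvTokA]
      rw [if_neg hseen]
      rw [List.foldl_reverse]
      set F := ((ft.get? fr.1).getD []).foldl (pvTokA ft) (out, []) with hF
      by_cases hF2 : F.2 = []
      · rw [hF2]; rfl
      · have htoks : (ft.get? fr.1).getD [] ≠ [] := by
          intro h; rw [h] at hF; simp [hF] at hF2
        have hkey : ft.contains fr.1 = true := by
          rw [PySem.Dict.contains_eq_isSome_get?]
          cases hg : ft.get? fr.1
          · rw [hg] at htoks; simp at htoks
          · rfl
        have hlt := pvUnseen_add_lt ft seen fr.1 hkey (by simpa using hseen)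
        exact pvFoldr_visit_fi ft (k + 1) k F.2 (PySem.Set.add seen fr.1, F.1)
          (by change pvUnseen ft (PySem.Set.add seen fr.1) < k + 1; omega)
          (by change pvUnseen ft (PySem.Set.add seen fr.1) < k; omega)

-- ===== VERDICT (by name: the statement is the Claim_ definition above) =====
theorem feature_enabled_dependency_keys_py_spec : Claim_equal_feature_enabled_dependency_keys_py := by
  intro manifest_data enabled_features _hdom
  unfold Spec_feature_enabled_dependency_keys_py
  unfold feature_enabled_dependency_keys_py feature_enabled_dependency_keys_py_alt
  have key : ∀ (ft : PySem.Dict String (List String)) (q : List String),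
      (pvLoopA ft PySem.Set.empty PySem.Set.empty q).2 =
      ((q.reverse.foldl (fun st feature => pvVisitB ft (ft.keys.length + 1) feature st)
        (PySem.Set.empty, PySem.Set.empty))).2 := by
    intro ft q
    rw [List.foldl_reverse]
    rw [pvLoopA_eq_foldr ft PySem.Set.empty PySem.Set.empty q (ft.keys.length + 1)
      (by unfold pvUnseen
          have := List.countP_le_length (p := fun k => !(PySem.Set.contains PySem.Set.empty k)) (l := ft.keys)
          omega)]
  exact key _ _
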